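-- pv_equiv track=rewrite | github.com/cyady/QA_tutorial | SlackBot_for_web/src/slackbot_for_web/engine_cli.py | _summarize_batch
-- ===== SOURCE A (Python) =====
-- from typing import Any
--
-- def _summarize_batch(results: list[dict[str, Any]]) -> dict[str, int]:
--     summary = {"pass": 0, "fail": 0, "needs_review": 0}
--     for row in results:
--         status = str(row.get("status") or "").strip().lower()
--         if status not in summary:
--             status = "needs_review"
--         summary[status] += 1
--     return summary
-- ===== SOURCE B (Python) =====
-- from typing import Any
--
-- def _summarize_batch(results: list[dict[str, Any]]) -> dict[str, int]:
--     statuses = [str(row.get("status") or "").strip().lower() for row in results]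
--     p = statuses.count("pass")
--     f = statuses.count("fail")
--     return {"pass": p, "fail": f, "needs_review": len(results) - p - f}
-- ===== Notes on version B (the rewrite author's own statement) =====
-- stated objective: simpler
-- what changed: Replaces the bucket-by-bucket dict mutation loop with a normalize-once list, two direct .count passes for 'pass' and 'fail', and derives needs_review as the complement len(results) - p - f.
import Mathlib
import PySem

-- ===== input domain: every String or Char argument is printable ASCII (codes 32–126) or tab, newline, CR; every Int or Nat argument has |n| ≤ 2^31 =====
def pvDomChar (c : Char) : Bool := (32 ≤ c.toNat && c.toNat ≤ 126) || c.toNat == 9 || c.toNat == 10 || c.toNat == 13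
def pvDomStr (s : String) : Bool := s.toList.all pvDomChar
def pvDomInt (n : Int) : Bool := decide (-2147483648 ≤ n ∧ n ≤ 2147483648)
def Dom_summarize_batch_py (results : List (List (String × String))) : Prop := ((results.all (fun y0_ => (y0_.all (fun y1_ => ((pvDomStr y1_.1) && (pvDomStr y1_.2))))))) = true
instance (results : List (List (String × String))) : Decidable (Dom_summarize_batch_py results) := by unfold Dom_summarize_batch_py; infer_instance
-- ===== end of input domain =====

-- B replaces A's dict-mutation loop by normalizing every row once, counting 'pass' and 'fail'
-- directly, and deriving needs_review as the complement len(results) - p - f (objective: simpler).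

-- ===== PORT A =====
-- status = str(row.get("status") or "").strip().lower()  (row values are strings, so str() and
-- 'or ""' amount to defaulting a missing/empty value to "")
def pvStatusA (row : List (String × String)) : String :=
  PySem.Str.lower (PySem.Str.strip (((PySem.Dict.mk row).get? "status").getD ""))

-- the body of A's for-loop: bucket the row's normalized status into the summary dict
def pvStepA (summary : PySem.Dict String Int) (row : List (String × String)) : PySem.Dict String Int :=
  let status := pvStatusA row
  let status := if summary.contains status then status else "needs_review"
  summary.modify status 0 (· + 1)

def summarize_batch_py (results : List (List (String × String))) : List (String × Int) :=
  (results.foldl pvStepA (PySem.Dict.mk [("pass", 0), ("fail", 0), ("needs_review", 0)])).items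

-- ===== PORT B =====
-- str(row.get("status") or "").strip().lower(), as in Source B's list comprehension
def pvStatusB (row : List (String × String)) : String :=
  PySem.Str.lower (PySem.Str.strip (((PySem.Dict.mk row).get? "status").getD ""))

def summarize_batch_py_alt (results : List (List (String × String))) : List (String × Int) :=
  let statuses := results.map pvStatusB
  let p : Int := (statuses.count "pass" : Int)
  let f : Int := (statuses.count "fail" : Int)
  [("pass", p), ("fail", f), ("needs_review", (results.length : Int) - p - f)]

-- ===== PRECONDITION & SPEC =====
def Spec_summarize_batch_py (results : List (List (String × String))) (out : List (String × Int)) : Prop := out = summarize_batch_py_alt results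
instance (results : List (List (String × String))) (out : List (String × Int)) : Decidable (Spec_summarize_batch_py results out) := by unfold Spec_summarize_batch_py; infer_instance

-- ===== CLAIM (what is proved, stated in full; the proofs are below) =====
def Claim_equal_summarize_batch_py : Prop := ∀ (results : List (List (String × String))), Dom_summarize_batch_py results → Spec_summarize_batch_py results (summarize_batch_py results)

-- ===== LEMMAS AND PROOFS =====

-- A's loop, started from any counter values, adds the pass count, the fail count, and the
-- complement (everything else lands in needs_review).
theorem pvLoopA (rows : List (List (String × String))) (p f n : Int) :
    rows.foldl pvStepA (PySem.Dict.mk [("pass", p), ("fail", f), ("needs_review", n)]) =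
    PySem.Dict.mk [("pass", p + ((rows.map pvStatusA).count "pass" : Int)),
                   ("fail", f + ((rows.map pvStatusA).count "fail" : Int)),
                   ("needs_review", n + (rows.length : Int)
                      - ((rows.map pvStatusA).count "pass" : Int)
                      - ((rows.map pvStatusA).count "fail" : Int))] := by
  induction rows generalizing p f n with
  | nil => simp
  | cons r rest ih =>
    have hstep : ∀ p f n : Int,
        pvStepA (PySem.Dict.mk [("pass", p), ("fail", f), ("needs_review", n)]) r =
        if pvStatusA r = "pass" then
          PySem.Dict.mk [("pass", p + 1), ("fail", f), ("needs_review", n)]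
        else if pvStatusA r = "fail" then
          PySem.Dict.mk [("pass", p), ("fail", f + 1), ("needs_review", n)]
        else
          PySem.Dict.mk [("pass", p), ("fail", f), ("needs_review", n + 1)] := by
      intro p f n
      by_cases h1 : pvStatusA r = "pass"
      · simp [pvStepA, h1, PySem.Dict.modify, PySem.Dict.contains, PySem.Dict.insert,
              PySem.Dict.getD, PySem.Dict.get?]
      · by_cases h2 : pvStatusA r = "fail"
        · simp [pvStepA, h2, PySem.Dict.modify, PySem.Dict.contains,
                PySem.Dict.insert, PySem.Dict.getD, PySem.Dict.get?]
        · by_cases h3 : pvStatusA r = "needs_review"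
          · simp [pvStepA, h3, PySem.Dict.modify, PySem.Dict.contains,
                  PySem.Dict.insert, PySem.Dict.getD, PySem.Dict.get?]
          · simp [pvStepA, Ne.symm h1, Ne.symm h2, Ne.symm h3, h1, h2, PySem.Dict.modify,
                  PySem.Dict.contains, PySem.Dict.insert, PySem.Dict.getD, PySem.Dict.get?]
    simp only [List.foldl_cons, hstep]
    by_cases h1 : pvStatusA r = "pass"
    · rw [if_pos h1, ih]
      simp [h1]
      constructor <;> ring
    · rw [if_neg h1]
      by_cases h2 : pvStatusA r = "fail"
      · rw [if_pos h2, ih]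
        simp [h2]
        constructor <;> ring
      · rw [if_neg h2, ih]
        simp [h1, h2]
        ring

-- ===== VERDICT (by name: the statement is the Claim_ definition above) =====
theorem summarize_batch_py_spec : Claim_equal_summarize_batch_py := by
  intro results _
  show summarize_batch_py results = summarize_batch_py_alt results
  have hst : pvStatusB = pvStatusA := rfl
  simp only [summarize_batch_py, summarize_batch_py_alt, pvLoopA, hst]
  simp
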